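-- pv_equiv track=rewrite | github.com/tlian25/dsa_notes | array/binary_search_2.py | binarySearchNearestLarger
-- ===== SOURCE A (Python) =====
-- def binarySearchNearestLarger(arr: list, target: int) -> int:
--     # need to use len(arr) which is outside if target > all numbers in arr
--     # In this case, j is end of array
--     i = 0
--     j = len(arr)
--
--     while i < j:
--         mid = (i + j) // 2
--         if arr[mid] == target:
--             # Slide if duplicates found
--             while mid - 1 >= 0 and arr[mid - 1] == target:
--                 mid -= 1
--             return mid
--
--         elif target < arr[mid]:
--             j = mid
--         else:
--             i = mid + 1
--     return j
-- ===== SOURCE B (Python) =====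
-- def binarySearchNearestLarger(arr: list, target: int) -> int:
--     # canonical bisect_left: single comparison per step, no equality branch,
--     # no slide loop, no early return
--     i, j = 0, len(arr)
--     while i < j:
--         mid = (i + j) // 2
--         if arr[mid] < target:
--             i = mid + 1
--         else:
--             j = mid
--     return i
-- ===== Notes on version B (the rewrite author's own statement) =====
-- stated objective: simpler
-- what changed: Replaced A's three-way branch (equality test with an inner leftward slide loop over duplicates plus an early return) by the canonical two-branch bisect_left that keeps a single monotone invariant and one comparison per step; Pre_ admits sorted arrays and any array not containing target, excluding only unsorted arrays containing target, where A's equality-hit-and-slide value is an accident of probe order.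
-- outside the precondition, e.g. on binarySearchNearestLarger([1, 0, 0], 0): A returns 1, B returns 0
import Mathlib
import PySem

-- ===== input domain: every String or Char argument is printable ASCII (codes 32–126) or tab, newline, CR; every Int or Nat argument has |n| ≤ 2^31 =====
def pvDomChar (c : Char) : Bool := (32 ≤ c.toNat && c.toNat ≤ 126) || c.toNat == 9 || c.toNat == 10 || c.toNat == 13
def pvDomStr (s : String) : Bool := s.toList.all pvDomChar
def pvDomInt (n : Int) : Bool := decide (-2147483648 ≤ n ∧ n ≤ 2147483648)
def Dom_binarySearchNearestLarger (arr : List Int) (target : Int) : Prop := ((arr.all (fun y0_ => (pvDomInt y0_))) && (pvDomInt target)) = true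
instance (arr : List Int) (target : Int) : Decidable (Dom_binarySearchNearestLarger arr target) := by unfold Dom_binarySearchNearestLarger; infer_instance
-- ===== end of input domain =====

-- B replaces A's equality-branch-plus-slide binary search by the canonical
-- two-branch bisect_left (one comparison per step, no slide loop, no early
-- return); simpler, same result on sorted input.


-- ===== PORT A =====
-- inner slide loop: while mid - 1 >= 0 and arr[mid - 1] == target: mid -= 1
-- (i, j, mid stay in [0, len arr] throughout, so Nat with Nat division and
--  List.getD is exact here: every index actually read is in range)
def bsnlSlide (arr : List Int) (target : Int) (mid : Nat) : Nat :=
  if h : 1 ≤ mid ∧ arr.getD (mid - 1) 0 = target then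
    bsnlSlide arr target (mid - 1)
  else mid
termination_by mid
decreasing_by omega

def bsnlLoop (arr : List Int) (target : Int) (i j : Nat) : Int :=
  if h : i < j then
    let mid := (i + j) / 2
    if arr.getD mid 0 = target then
      Int.ofNat (bsnlSlide arr target mid)         -- early return of the slid mid
    else if target < arr.getD mid 0 then
      bsnlLoop arr target i mid
    else
      bsnlLoop arr target (mid + 1) j
  else Int.ofNat j
termination_by j - i
decreasing_by all_goals omega

def binarySearchNearestLarger (arr : List Int) (target : Int) : Int :=
  bsnlLoop arr target 0 arr.length

-- ===== PORT B =====
def bsnlAltLoop (arr : List Int) (target : Int) (i j : Nat) : Nat :=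
  if h : i < j then
    let mid := (i + j) / 2
    if arr.getD mid 0 < target then
      bsnlAltLoop arr target (mid + 1) j
    else
      bsnlAltLoop arr target i mid
  else i
termination_by j - i
decreasing_by all_goals omega

def binarySearchNearestLarger_alt (arr : List Int) (target : Int) : Int :=
  Int.ofNat (bsnlAltLoop arr target 0 arr.length)

-- ===== PRECONDITION & SPEC =====
-- Pre_ excludes only unsorted arrays that contain target: there A's
-- equality-hit-and-slide value depends accidentally on which midpoints the
-- probes hit (e.g. A returns 1 on ([1,0,0], 0) where B returns 0), and no
-- caller of a binary search is specified on unsorted input. On sorted input,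
-- and on any input not containing target, A = B is claimed and proved.
def Pre_binarySearchNearestLarger (arr : List Int) (target : Int) : Prop :=
  List.Pairwise (· ≤ ·) arr ∨ target ∉ arr
instance (arr : List Int) (target : Int) : Decidable (Pre_binarySearchNearestLarger arr target) := by unfold Pre_binarySearchNearestLarger; infer_instance

def pvWitness_binarySearchNearestLarger : List Int × Int := ([1, 2, 2, 3], 2)

def Spec_binarySearchNearestLarger (arr : List Int) (target : Int) (out : Int) : Prop := out = binarySearchNearestLarger_alt arr target
instance (arr : List Int) (target : Int) (out : Int) : Decidable (Spec_binarySearchNearestLarger arr target out) := by unfold Spec_binarySearchNearestLarger; infer_instance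

-- ===== CLAIM (what is proved, stated in full; the proofs are below) =====
def Claim_equal_binarySearchNearestLarger : Prop := ∀ (arr : List Int) (target : Int), Dom_binarySearchNearestLarger arr target → Pre_binarySearchNearestLarger arr target → Spec_binarySearchNearestLarger arr target (binarySearchNearestLarger arr target)

-- ===== LEMMAS AND PROOFS =====

-- the common value both programs compute on sorted input:
-- the number of elements strictly below target
def bsnlCount (arr : List Int) (target : Int) : Nat :=
  arr.countP (fun x => decide (x < target))

-- on a sorted list, the elements below target form a prefix of length bsnlCount
theorem bsnl_prefix (arr : List Int) (target : Int)
    (hs : List.Pairwise (· ≤ ·) arr) :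
    ∀ k, k < arr.length → (arr.getD k 0 < target ↔ k < bsnlCount arr target) := by
  induction arr with
  | nil => intro k hk; simp at hk
  | cons a tl ih =>
    rw [List.pairwise_cons] at hs
    obtain ⟨ha, htl⟩ := hs
    intro k hk
    by_cases h : a < target
    · cases k with
      | zero =>
        simp [bsnlCount, h]
      | succ k =>
        have := ih htl k (by simpa using hk)
        simp only [bsnlCount, List.countP_cons, h, List.getD_cons_succ] at *
        simp only [decide_true, if_true]
        omega
    · have hz : tl.countP (fun x => decide (x < target)) = 0 := by
        rw [List.countP_eq_zero]
        intro x hx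
        simp only [decide_eq_true_eq]
        have := ha x hx
        omega
      have hc : bsnlCount (a :: tl) target = 0 := by
        simp [bsnlCount, h, hz]
      rw [hc]
      cases k with
      | zero => simpa using h
      | succ k =>
        simp only [List.getD_cons_succ]
        constructor
        · intro hlt
          exfalso
          have hk' : k < tl.length := by simpa using hk
          have hmem : tl.getD k 0 ∈ tl := by
            rw [List.getD_eq_getElem _ _ hk']
            exact List.getElem_mem hk'
          have := ha _ hmem
          omega
        · omega

theorem bsnlSlide_eq (arr : List Int) (target : Int)
    (hp : ∀ k, k < arr.length → (arr.getD k 0 < target ↔ k < bsnlCount arr target))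
    (hs : List.Pairwise (· ≤ ·) arr) :
    ∀ mid, mid < arr.length → arr.getD mid 0 = target →
      bsnlSlide arr target mid = bsnlCount arr target := by
  intro mid
  induction mid using bsnlSlide.induct arr target with
  | case1 mid h ih =>
    intro hlen heq
    rw [bsnlSlide, dif_pos h]
    exact ih (by omega) h.2
  | case2 mid h =>
    intro hlen heq
    rw [bsnlSlide, dif_neg h]
    have h1 : ¬ arr.getD mid 0 < target := by omega
    have hge : bsnlCount arr target ≤ mid := by
      have := (hp mid hlen).not
      omega
    rcases Nat.eq_zero_or_pos mid with h0 | h0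
    · omega
    · -- slide stopped: arr[mid-1] ≠ target; sorted gives arr[mid-1] ≤ arr[mid] = target, so <
      have hne : arr.getD (mid - 1) 0 ≠ target := by tauto
      have hle : arr.getD (mid - 1) 0 ≤ arr.getD mid 0 := by
        rw [List.getD_eq_getElem _ _ (by omega : mid - 1 < arr.length),
            List.getD_eq_getElem _ _ hlen]
        exact List.pairwise_iff_getElem.mp hs (mid - 1) mid (by omega) hlen (by omega)
      have hlt : arr.getD (mid - 1) 0 < target := by omega
      have := (hp (mid - 1) (by omega)).mp hlt
      omega

theorem bsnlLoop_eq (arr : List Int) (target : Int)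
    (hp : ∀ k, k < arr.length → (arr.getD k 0 < target ↔ k < bsnlCount arr target))
    (hs : List.Pairwise (· ≤ ·) arr) :
    ∀ i j, j ≤ arr.length → i ≤ bsnlCount arr target → bsnlCount arr target ≤ j →
      bsnlLoop arr target i j = Int.ofNat (bsnlCount arr target) := by
  intro i j
  induction i, j using bsnlLoop.induct arr target with
  | case1 i j h mid heq =>
    intro hj hi hc
    rw [bsnlLoop, dif_pos h, if_pos heq]
    rw [bsnlSlide_eq arr target hp hs mid (by omega) heq]
  | case2 i j h mid hne hgt ih =>
    intro hj hi hc
    rw [bsnlLoop, dif_pos h, if_neg hne, if_pos hgt]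
    have := (hp mid (by omega)).not
    exact ih (by omega) hi (by omega)
  | case3 i j h mid hne hgt ih =>
    intro hj hi hc
    rw [bsnlLoop, dif_pos h, if_neg hne, if_neg hgt]
    have hlt : arr.getD mid 0 < target := by
      have h1 : arr.getD mid 0 ≠ target := hne
      omega
    have := (hp mid (by omega)).mp hlt
    exact ih hj (by omega) hc
  | case4 i j h =>
    intro hj hi hc
    rw [bsnlLoop, dif_neg h]
    congr 1
    omega

theorem bsnlAltLoop_eq (arr : List Int) (target : Int)
    (hp : ∀ k, k < arr.length → (arr.getD k 0 < target ↔ k < bsnlCount arr target)) :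
    ∀ i j, j ≤ arr.length → i ≤ bsnlCount arr target → bsnlCount arr target ≤ j →
      bsnlAltLoop arr target i j = bsnlCount arr target := by
  intro i j
  induction i, j using bsnlAltLoop.induct arr target with
  | case1 i j h mid hlt ih =>
    intro hj hi hc
    rw [bsnlAltLoop, dif_pos h, if_pos hlt]
    have := (hp mid (by omega)).mp hlt
    exact ih hj (by omega) hc
  | case2 i j h mid hlt ih =>
    intro hj hi hc
    rw [bsnlAltLoop, dif_pos h, if_neg hlt]
    have := (hp mid (by omega)).not
    exact ih (by omega) hi (by omega)
  | case3 i j h =>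
    intro hj hi hc
    rw [bsnlAltLoop, dif_neg h]
    omega

-- ===== VERDICT (by name: the statement is the Claim_ definition above) =====
-- when target does not occur in arr, A's equality branch never fires and the
-- two remaining branches make the very same window updates as B's
theorem bsnl_notmem_eq (arr : List Int) (target : Int) (hm : target ∉ arr) :
    ∀ i j, i ≤ j → j ≤ arr.length →
      bsnlLoop arr target i j = Int.ofNat (bsnlAltLoop arr target i j) := by
  intro i j
  induction i, j using bsnlLoop.induct arr target with
  | case1 i j h mid heq =>
    intro hij hj
    exfalso
    have hlt : mid < arr.length := by omega
    have : arr.getD mid 0 ∈ arr := by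
      rw [List.getD_eq_getElem _ _ hlt]
      exact List.getElem_mem hlt
    exact hm (heq ▸ this)
  | case2 i j h mid hne hgt ih =>
    intro hij hj
    rw [bsnlLoop, dif_pos h, if_neg hne, if_pos hgt,
        bsnlAltLoop, dif_pos h, if_neg (show ¬ arr.getD mid 0 < target by omega)]
    exact ih (by omega) (by omega)
  | case3 i j h mid hne hgt ih =>
    intro hij hj
    have hlt : arr.getD mid 0 < target := by
      have h1 : arr.getD mid 0 ≠ target := hne
      omega
    rw [bsnlLoop, dif_pos h, if_neg hne, if_neg hgt,
        bsnlAltLoop, dif_pos h, if_pos hlt]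
    exact ih (by omega) hj
  | case4 i j h =>
    intro hij hj
    rw [bsnlLoop, dif_neg h, bsnlAltLoop, dif_neg h]
    congr 1
    omega

theorem binarySearchNearestLarger_spec : Claim_equal_binarySearchNearestLarger := by
  intro arr target _ hpre
  rcases hpre with hs | hm
  swap
  · exact bsnl_notmem_eq arr target hm 0 arr.length (Nat.zero_le _) le_rfl
  have hp := bsnl_prefix arr target hs
  have hlen := List.countP_le_length (l := arr) (p := fun x => decide (x < target))
  unfold Spec_binarySearchNearestLarger binarySearchNearestLarger binarySearchNearestLarger_alt
  rw [bsnlLoop_eq arr target hp hs 0 arr.length le_rfl (Nat.zero_le _) hlen,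
      bsnlAltLoop_eq arr target hp 0 arr.length le_rfl (Nat.zero_le _) hlen]
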